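-- pv_equiv track=rewrite | github.com/lucasfratus/python-uem | treino/repeticao_arranjos_treino2/verifica_len_menor_que_4.py | verifica_menor_que_4
-- ===== SOURCE A (Python) =====
-- def verifica_menor_que_4(lst: list[float]) -> bool:
--     '''
--     Verifica se o tamanho de *lst* é menor que 4. Caso for, produz True. Caso contrário, produz False.
--     Exemplos:
--     >>> verifica_menor_que_4([])
--     True
--     >>> verifica_menor_que_4([1.2,2.5,3.0])
--     True
--     >>> verifica_menor_que_4([1.2,2.3,3.5,6.7])
--     False
--     >>> verifica_menor_que_4([1.2,2.3,3.5,6.7,7.5])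
--     False
--     '''
--     i = 0
--     menor_que_4 = True
--     while menor_que_4 and i < len(lst):
--         if i == 3:
--             menor_que_4 = False
--         i = i + 1
--     return menor_que_4
-- ===== SOURCE B (Python) =====
-- def verifica_menor_que_4(lst: list[float]) -> bool:
--     return len(lst) < 4
-- ===== Notes on version B (the rewrite author's own statement) =====
-- stated objective: simpler
-- what changed: Replaces the flag-and-counter while loop with a single closed-form length comparison len(lst) < 4.
import Mathlib
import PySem

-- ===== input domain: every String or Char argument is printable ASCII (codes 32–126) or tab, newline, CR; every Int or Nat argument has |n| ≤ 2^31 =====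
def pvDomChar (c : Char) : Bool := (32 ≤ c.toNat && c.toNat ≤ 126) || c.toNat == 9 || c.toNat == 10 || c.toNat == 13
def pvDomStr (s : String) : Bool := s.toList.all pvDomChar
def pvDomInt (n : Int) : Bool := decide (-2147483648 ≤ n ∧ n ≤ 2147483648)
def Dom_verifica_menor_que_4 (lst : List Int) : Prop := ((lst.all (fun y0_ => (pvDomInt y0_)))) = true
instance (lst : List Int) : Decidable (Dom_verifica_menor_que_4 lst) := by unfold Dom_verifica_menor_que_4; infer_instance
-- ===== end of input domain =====

-- B replaces A's flag-and-counter while loop by the closed-form comparison len(lst) < 4 (simpler).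


-- ===== PORT A =====
-- loop of A: fuel = lst.length - i iterations remain, since the loop body always increments i;
-- the `while menor_que_4 ∧ i < len(lst)` condition becomes `flag ∧ fuel > 0`.
def pvLoopA : Nat → Int → Bool → Bool
  | 0, _, flag => flag
  | n+1, i, flag =>
      if flag then pvLoopA n (i + 1) (if i = 3 then false else flag)
      else flag

def verifica_menor_que_4 (lst : List Int) : Bool := pvLoopA lst.length 0 true

-- ===== PORT B =====
def verifica_menor_que_4_alt (lst : List Int) : Bool := decide (lst.length < 4)

-- ===== PRECONDITION & SPEC =====
def Spec_verifica_menor_que_4 (lst : List Int) (out : Bool) : Prop := out = verifica_menor_que_4_alt lst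
instance (lst : List Int) (out : Bool) : Decidable (Spec_verifica_menor_que_4 lst out) := by unfold Spec_verifica_menor_que_4; infer_instance

-- ===== CLAIM (what is proved, stated in full; the proofs are below) =====
def Claim_equal_verifica_menor_que_4 : Prop := ∀ (lst : List Int), Dom_verifica_menor_que_4 lst → Spec_verifica_menor_que_4 lst (verifica_menor_que_4 lst)

-- ===== LEMMAS AND PROOFS =====
theorem pvLoopA_false (n : Nat) (i : Int) : pvLoopA n i false = false := by
  induction n generalizing i with
  | zero => rfl
  | succ m ih => simp [pvLoopA]

theorem pvLoopA_zero_true (n : Nat) : pvLoopA n 0 true = decide (n < 4) := by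
  match n with
  | 0 | 1 | 2 | 3 => decide
  | m + 4 =>
      show pvLoopA (m + 4) 0 true = decide (m + 4 < 4)
      simp only [pvLoopA, if_true]
      norm_num [pvLoopA_false]

-- ===== VERDICT (by name: the statement is the Claim_ definition above) =====
theorem verifica_menor_que_4_spec : Claim_equal_verifica_menor_que_4 := by
  intro lst _
  unfold Spec_verifica_menor_que_4 verifica_menor_que_4 verifica_menor_que_4_alt
  exact pvLoopA_zero_true lst.length
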